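-- pv_equiv track=rewrite | github.com/zxddev/frontai-core | scripts/test_voice_commander_e2e.py | validate_websocket_messages
-- ===== SOURCE A (Python) =====
-- from typing import Any, Dict, List, Optional
--
-- def validate_websocket_messages(messages: List[Dict]) -> List[str]:
--     """验证 WebSocket 消息格式"""
--     errors = []
--
--     # 检查必须的消息类型
--     types = [m.get("type") for m in messages]
--
--     if "ai_response" not in types:
--         errors.append("Missing 'ai_response' message")
--
--     if "llm_done" not in types:
--         errors.append("Missing 'llm_done' message")
--
--     # 验证 ai_response 消息格式
--     ai_msgs = [m for m in messages if m.get("type") == "ai_response"]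
--     for msg in ai_msgs:
--         if "text" not in msg:
--             errors.append("ai_response missing 'text' field")
--         if "ui_actions" not in msg:
--             errors.append("ai_response missing 'ui_actions' field")
--
--     return errors
-- ===== SOURCE B (Python) =====
-- def validate_websocket_messages(messages):
--     """Single pass: track presence flags and collect ai_response field errors."""
--     has_ai = False
--     has_done = False
--     field_errors = []
--     for m in messages:
--         t = m.get("type")
--         if t == "ai_response":
--             has_ai = True
--             if "text" not in m:
--                 field_errors.append("ai_response missing 'text' field")
--             if "ui_actions" not in m:
--                 field_errors.append("ai_response missing 'ui_actions' field")
--         elif t == "llm_done":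
--             has_done = True
--     errors = []
--     if not has_ai:
--         errors.append("Missing 'ai_response' message")
--     if not has_done:
--         errors.append("Missing 'llm_done' message")
--     errors.extend(field_errors)
--     return errors
-- ===== Notes on version B (the rewrite author's own statement) =====
-- stated objective: alternative
-- what changed: Replaces A's three separate passes (a map to collect types, two membership tests, and a filter-then-loop over ai_response messages) with one loop tracking has_ai/has_done flags and accumulating field errors, assembling the error list afterwards.
import Mathlib
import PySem

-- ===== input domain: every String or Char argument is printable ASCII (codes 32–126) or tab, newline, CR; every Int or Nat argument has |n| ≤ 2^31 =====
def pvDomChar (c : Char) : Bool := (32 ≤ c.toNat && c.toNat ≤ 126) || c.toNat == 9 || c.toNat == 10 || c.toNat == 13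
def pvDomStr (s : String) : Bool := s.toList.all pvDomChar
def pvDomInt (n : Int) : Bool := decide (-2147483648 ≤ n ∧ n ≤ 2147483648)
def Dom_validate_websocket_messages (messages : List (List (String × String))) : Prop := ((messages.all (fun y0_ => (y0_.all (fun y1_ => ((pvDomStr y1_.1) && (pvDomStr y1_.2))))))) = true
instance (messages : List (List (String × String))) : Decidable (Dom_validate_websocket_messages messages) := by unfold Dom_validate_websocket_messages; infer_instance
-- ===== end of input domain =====

-- B collapses A's three passes into one flag-tracking loop; same output, no speed claim.

-- ===== PORT A =====
-- the body of A's for-loop over ai_msgs (two 'not in' checks, appending)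
def pvFieldCheck (errs : List String) (m : List (String × String)) : List String :=
  let errs := if !((PySem.Dict.mk m).contains "text") then errs ++ ["ai_response missing 'text' field"] else errs
  if !((PySem.Dict.mk m).contains "ui_actions") then errs ++ ["ai_response missing 'ui_actions' field"] else errs

def validate_websocket_messages (messages : List (List (String × String))) : List String :=
  let errors : List String := []
  let types := messages.map (fun m => (PySem.Dict.mk m).get? "type")
  let errors := if !(types.contains (some "ai_response")) then errors ++ ["Missing 'ai_response' message"] else errors
  let errors := if !(types.contains (some "llm_done")) then errors ++ ["Missing 'llm_done' message"] else errors
  let ai_msgs := messages.filter (fun m => (PySem.Dict.mk m).get? "type" == some "ai_response")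
  ai_msgs.foldl pvFieldCheck errors

-- ===== PORT B =====
-- one step of B's single loop: state = (has_ai, has_done, field_errors)
def pvAltStep (s : Bool × Bool × List String) (m : List (String × String)) : Bool × Bool × List String :=
  let t := (PySem.Dict.mk m).get? "type"
  if t == some "ai_response" then
    let fe := s.2.2
    let fe := if !((PySem.Dict.mk m).contains "text") then fe ++ ["ai_response missing 'text' field"] else fe
    let fe := if !((PySem.Dict.mk m).contains "ui_actions") then fe ++ ["ai_response missing 'ui_actions' field"] else fe
    (true, s.2.1, fe)
  else if t == some "llm_done" then (s.1, true, s.2.2)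
  else s

def validate_websocket_messages_alt (messages : List (List (String × String))) : List String :=
  let s := messages.foldl pvAltStep (false, false, [])
  let errors : List String := if !s.1 then ["Missing 'ai_response' message"] else []
  let errors := if !s.2.1 then errors ++ ["Missing 'llm_done' message"] else errors
  errors ++ s.2.2

-- ===== PRECONDITION & SPEC =====
def Spec_validate_websocket_messages (messages : List (List (String × String))) (out : List String) : Prop := out = validate_websocket_messages_alt messages
instance (messages : List (List (String × String))) (out : List String) : Decidable (Spec_validate_websocket_messages messages out) := by unfold Spec_validate_websocket_messages; infer_instance

-- ===== CLAIM (what is proved, stated in full; the proofs are below) =====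
def Claim_equal_validate_websocket_messages : Prop := ∀ (messages : List (List (String × String))), Dom_validate_websocket_messages messages → Spec_validate_websocket_messages messages (validate_websocket_messages messages)

-- ===== LEMMAS AND PROOFS =====

-- abbreviations for the proofs
def pvIsAI (m : List (String × String)) : Bool := (PySem.Dict.mk m).get? "type" == some "ai_response"
def pvIsDone (m : List (String × String)) : Bool := (PySem.Dict.mk m).get? "type" == some "llm_done"

lemma pvFieldCheck_append (e : List String) (m : List (String × String)) :
    pvFieldCheck e m = e ++ pvFieldCheck [] m := by
  unfold pvFieldCheck; split_ifs <;> simp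

lemma foldl_fieldCheck_append (ms : List (List (String × String))) (e : List String) :
    ms.foldl pvFieldCheck e = e ++ ms.foldl pvFieldCheck [] := by
  induction ms generalizing e with
  | nil => simp
  | cons m ms ih =>
    simp only [List.foldl_cons]
    rw [ih, pvFieldCheck_append, ih (pvFieldCheck [] m), List.append_assoc]

lemma contains_map_any (ms : List (List (String × String))) (x : String) :
    (ms.map (fun m => (PySem.Dict.mk m).get? "type")).contains (some x)
      = ms.any (fun m => (PySem.Dict.mk m).get? "type" == some x) := by
  induction ms with
  | nil => simp
  | cons m ms ih =>
    simp only [List.map_cons, List.contains_cons, List.any_cons, ih, BEq.comm]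

lemma altStep_ai (s : Bool × Bool × List String) (m : List (String × String))
    (h : pvIsAI m = true) :
    pvAltStep s m = (true, s.2.1, pvFieldCheck s.2.2 m) := by
  unfold pvIsAI at h
  simp only [pvAltStep, pvFieldCheck, h, if_true]

lemma altStep_done (s : Bool × Bool × List String) (m : List (String × String))
    (h1 : pvIsAI m = false) (h2 : pvIsDone m = true) :
    pvAltStep s m = (s.1, true, s.2.2) := by
  unfold pvIsAI at h1; unfold pvIsDone at h2
  simp only [pvAltStep, h1, h2, if_true, Bool.false_eq_true, if_false]

lemma altStep_other (s : Bool × Bool × List String) (m : List (String × String))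
    (h1 : pvIsAI m = false) (h2 : pvIsDone m = false) :
    pvAltStep s m = s := by
  unfold pvIsAI at h1; unfold pvIsDone at h2
  simp only [pvAltStep, h1, h2, Bool.false_eq_true, if_false]

lemma ai_not_done (m : List (String × String)) (h : pvIsAI m = true) : pvIsDone m = false := by
  unfold pvIsAI at h; unfold pvIsDone
  rw [eq_of_beq h]; decide

lemma foldl_altStep_eq (ms : List (List (String × String))) (a b : Bool) (fe : List String) :
    ms.foldl pvAltStep (a, b, fe)
      = (a || ms.any pvIsAI, b || ms.any pvIsDone,
         fe ++ (ms.filter pvIsAI).foldl pvFieldCheck []) := by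
  induction ms generalizing a b fe with
  | nil => simp
  | cons m ms ih =>
    simp only [List.foldl_cons, List.any_cons, List.filter_cons]
    by_cases hAI : pvIsAI m = true
    · have hD := ai_not_done m hAI
      rw [altStep_ai _ _ hAI, ih]
      simp only [hAI, hD, if_true, Bool.true_or, Bool.or_true, Bool.false_or,
        List.foldl_cons]
      rw [foldl_fieldCheck_append (List.filter pvIsAI ms) (pvFieldCheck [] m),
        pvFieldCheck_append, List.append_assoc]
    · rw [Bool.not_eq_true] at hAI
      by_cases hD : pvIsDone m = true
      · rw [altStep_done _ _ hAI hD, ih]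
        simp [hAI, hD]
      · rw [Bool.not_eq_true] at hD
        rw [altStep_other _ _ hAI hD, ih]
        simp [hAI, hD]

-- ===== VERDICT (by name: the statement is the Claim_ definition above) =====
theorem validate_websocket_messages_spec : Claim_equal_validate_websocket_messages := by
  intro messages _
  show validate_websocket_messages messages = validate_websocket_messages_alt messages
  unfold validate_websocket_messages validate_websocket_messages_alt
  rw [foldl_altStep_eq]
  simp only [Bool.false_or]
  rw [contains_map_any, contains_map_any]
  rw [foldl_fieldCheck_append]
  show _ = _ ++ (List.filter pvIsAI messages).foldl pvFieldCheck []
  have h1 : (fun m => (PySem.Dict.mk m).get? "type" == some "ai_response") = pvIsAI := rfl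
  have h2 : (fun m => (PySem.Dict.mk m).get? "type" == some "llm_done") = pvIsDone := rfl
  rw [h1, h2]
  congr 1
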